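-- pv_equiv track=rewrite | github.com/cb109/mxs_types | build.py | process_scriptcontent
-- ===== SOURCE A (Python) =====
-- def process_scriptcontent(content):
--     """Removes unwanted fileIn()'s and whitespace
--     that should not be part of the final build."""
--     content = content.strip()
--     lines = content.split("\n")
--
--     def _filter_lines(lines):
--         struct_def_found = False
--         for line in lines:
--             if line.strip().startswith("struct "):
--                 struct_def_found = True
--             if struct_def_found:
--                 yield line
--
--     lines = list(_filter_lines(lines))
--     fixed_content = "\n".join(lines)
--     return fixed_content
-- ===== SOURCE B (Python) =====
-- def process_scriptcontent(content):
--     """Removes unwanted fileIn()'s and whitespace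
--     that should not be part of the final build."""
--     lines = content.strip().split("\n")
--     keep = 0
--     depth = 0
--     for line in reversed(lines):
--         depth += 1
--         if line.strip().startswith("struct "):
--             keep = depth
--     return "\n".join(lines[len(lines) - keep:])
-- ===== Notes on version B (the rewrite author's own statement) =====
-- stated objective: alternative
-- what changed: Replaces A's forward flag-carrying generator filter with a backward traversal over reversed(lines) that remembers the length of the longest suffix beginning at a struct line, then joins that suffix slice; no flag and no filtered list are built.
import Mathlib
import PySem

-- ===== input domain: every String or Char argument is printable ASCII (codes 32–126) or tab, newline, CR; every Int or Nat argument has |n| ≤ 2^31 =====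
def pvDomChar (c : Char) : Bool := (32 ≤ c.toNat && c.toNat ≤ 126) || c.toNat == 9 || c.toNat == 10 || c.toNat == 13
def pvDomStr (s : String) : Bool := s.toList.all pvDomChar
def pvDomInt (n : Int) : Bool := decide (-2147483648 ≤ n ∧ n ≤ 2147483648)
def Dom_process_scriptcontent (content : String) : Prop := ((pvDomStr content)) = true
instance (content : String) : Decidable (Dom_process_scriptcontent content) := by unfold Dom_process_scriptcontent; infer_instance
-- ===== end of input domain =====

-- B replaces A's forward flag-carrying generator filter with a backward pass that remembers
-- the length of the longest suffix beginning at a struct line, then joins that suffix (simpler decomposition, same cost).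

-- ===== PORT A =====
-- one step of A's _filter_lines generator: state = (struct_def_found, yielded lines)
def pvFilterStep (st : Bool × List String) (line : String) : Bool × List String :=
  let flag := st.1 || PySem.Str.startswith (PySem.Str.strip line) "struct "
  (flag, if flag then st.2 ++ [line] else st.2)

def process_scriptcontent (content : String) : String :=
  let content := PySem.Str.strip content
  let lines : List String := (PySem.Str.split? content "\n").getD []  -- sep "\n" ≠ "", so split? is some: exact s.split("\n")
  let lines := (lines.foldl pvFilterStep (false, [])).2
  PySem.Str.join "\n" lines

-- ===== PORT B =====
-- one step of B's reversed-iteration loop: state = (keep, depth); depth += 1; if match: keep = depth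
def pvSuffixStep (st : Int × Int) (line : String) : Int × Int :=
  let depth := st.2 + 1
  (if PySem.Str.startswith (PySem.Str.strip line) "struct " then depth else st.1, depth)

def process_scriptcontent_alt (content : String) : String :=
  let lines : List String := (PySem.Str.split? (PySem.Str.strip content) "\n").getD []  -- sep ≠ "": exact
  let st := lines.reverse.foldl pvSuffixStep (0, 0)                       -- for line in reversed(lines)
  PySem.Str.join "\n" (PySem.List.slice lines (some ((lines.length : Int) - st.1)) none)  -- lines[len(lines)-keep:]

-- ===== PRECONDITION & SPEC =====
def Spec_process_scriptcontent (content : String) (out : String) : Prop := out = process_scriptcontent_alt content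
instance (content : String) (out : String) : Decidable (Spec_process_scriptcontent content out) := by unfold Spec_process_scriptcontent; infer_instance

-- ===== CLAIM (what is proved, stated in full; the proofs are below) =====
def Claim_equal_process_scriptcontent : Prop := ∀ (content : String), Dom_process_scriptcontent content → Spec_process_scriptcontent content (process_scriptcontent content)

-- ===== LEMMAS AND PROOFS =====

-- the match predicate both loops test
def pvP (l : String) : Bool := PySem.Str.startswith (PySem.Str.strip l) "struct "

-- A side: once the flag is true, the fold yields every remaining line
theorem pvFold_true (xs : List String) (acc : List String) :
    xs.foldl pvFilterStep (true, acc) = (true, acc ++ xs) := by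
  induction xs generalizing acc with
  | nil => simp
  | cons x xs ih =>
    rw [List.foldl_cons]
    have hs : pvFilterStep (true, acc) x = (true, acc ++ [x]) := by
      simp only [pvFilterStep, Bool.true_or]; rfl
    rw [hs, ih]
    simp

-- A side: from flag-false state, the yielded lines are the suffix from the first struct line (if any)
theorem pvFold_false (xs : List String) (acc : List String) :
    (xs.foldl pvFilterStep (false, acc)).2 =
      acc ++ (match xs.findIdx? pvP with
              | some i => xs.drop i
              | none => []) := by
  induction xs generalizing acc with
  | nil => simp
  | cons x xs ih =>
    rw [List.foldl_cons]
    by_cases h : pvP x = true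
    · have hs : pvFilterStep (false, acc) x = (true, acc ++ [x]) := by
        simp only [pvFilterStep, Bool.false_or, pvP] at h ⊢; simp only [h]; rfl
      rw [hs, pvFold_true, List.findIdx?_cons]
      simp only [h, if_true]
      simp
    · have h' : pvP x = false := Bool.eq_false_iff.mpr h
      have hs : pvFilterStep (false, acc) x = (false, acc) := by
        simp only [pvFilterStep, Bool.false_or, pvP] at h' ⊢; simp only [h']; rfl
      rw [hs, ih, List.findIdx?_cons]
      simp only [h', Bool.false_eq_true, if_false]
      cases hf : xs.findIdx? pvP
      · simp only [Option.map_none]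
      · simp only [Option.map_some]
        rfl

-- B side: the backward fold computes (length of suffix from the first struct line, total length)
theorem pvFold_rev (xs : List String) :
    xs.reverse.foldl pvSuffixStep (0, 0) =
      ((match xs.findIdx? pvP with
        | some i => (xs.length : Int) - i
        | none => 0), (xs.length : Int)) := by
  rw [List.foldl_reverse]
  induction xs with
  | nil => simp
  | cons x xs ih =>
    rw [List.foldr_cons, ih, List.findIdx?_cons]
    by_cases h : pvP x = true
    · simp only [pvSuffixStep, pvP] at *
      simp only [h]
      simp
    · have h' : pvP x = false := Bool.eq_false_iff.mpr h
      simp only [h', Bool.false_eq_true, if_false]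
      cases hf : xs.findIdx? pvP with
      | none =>
        simp only [Option.map_none, pvSuffixStep, pvP] at h' ⊢
        simp only [h']
        simp
      | some i =>
        simp only [Option.map_some, pvSuffixStep, pvP] at h' ⊢
        simp only [h', Bool.false_eq_true, if_false, List.length_cons, Prod.mk.injEq]
        constructor <;> (push_cast; ring)

theorem pvJoin_nil : PySem.Str.join "\n" [] = "" := by decide

-- ===== VERDICT (by name: the statement is the Claim_ definition above) =====
theorem process_scriptcontent_spec : Claim_equal_process_scriptcontent := by
  intro content _
  unfold Spec_process_scriptcontent
  simp only [process_scriptcontent, process_scriptcontent_alt]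
  rw [pvFold_false, pvFold_rev]
  set xs := (PySem.Str.split? (PySem.Str.strip content) "\n").getD [] with hxs
  cases hf : xs.findIdx? pvP with
  | none =>
    simp only [List.nil_append, pvJoin_nil, sub_zero]
    rw [PySem.List.slice_from _ (by positivity)]
    simp only [Int.toNat_natCast, List.drop_length, pvJoin_nil]
  | some i =>
    have hi : i < xs.length := by
      have := List.findIdx?_eq_some_iff_findIdx_eq.mp hf
      exact this.1
    simp only [List.nil_append]
    have : (xs.length : Int) - ((xs.length : Int) - (i : Int)) = (i : Int) := by ring
    rw [this, PySem.List.slice_from _ (by positivity)]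
    simp only [Int.toNat_natCast]
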